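-- pv_equiv track=rewrite | github.com/ufal/theaitrobot | synopsis2script.py | extract_characters
-- ===== SOURCE A (Python) =====
-- from collections import defaultdict
--
-- def extract_characters(lines, prompt='', outline=''):
--     """Get all character names.
--
--     Order from most recent to least recent,
--     always add Man and Woman to have something, switch first two.
--     Gets all character names already used in the generated script.
--     Also returns already_has_character_lines: True if lines already contain
--     some lines said by some character ("Character: line"), False otherwise
--     i.e. lines is empty or only contains scenic remarks etc.
--     TODO:
--     - Probably also try to extract character names from the synopsis using
--     NER or something like that.
--     - Probably also from prompt?
--     """
--
--     # All characters that appear in lines,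
--     # going in reverse order to have most recent characters first
--     # (ordered because dicts are ordered in Python)
--     characters = defaultdict(int)
--     for line in reversed(lines):
--         line = line.strip()
--         colon_position = line.find(':')
--         if colon_position != -1:
--             # Character name including colon
--             character = line[:colon_position+1]
--             characters[character] += 1
--     already_has_character_lines = bool(characters)
--
--     # Always have these two
--     characters['Man:'] += 1
--     characters['Woman:'] += 1
--
--     # Switch first two; it is most likely that the penultimate character
--     # will speak now, not the one that has just spoken.
--     # We are guaranteed to have at least two characters because of the two defaults.
--     characters_list = list(characters.keys())
--     characters_list[0], characters_list[1] = characters_list[1], characters_list[0]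
--
--     return characters_list, already_has_character_lines
-- ===== SOURCE B (Python) =====
-- def extract_characters(lines, prompt='', outline=''):
--     """Move-to-front single forward pass instead of reversed counting dict."""
--     names = []
--     for line in lines:
--         stripped = line.strip()
--         colon = stripped.find(':')
--         if colon != -1:
--             name = stripped[:colon + 1]
--             if name in names:
--                 names.remove(name)
--             names.insert(0, name)
--     already_has_character_lines = bool(names)
--     for default in ('Man:', 'Woman:'):
--         if default not in names:
--             names.append(default)
--     names[0], names[1] = names[1], names[0]
--     return names, already_has_character_lines
-- ===== Notes on version B (the rewrite author's own statement) =====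
-- stated objective: alternative
-- what changed: Replaces A's reversed-iteration counting defaultdict (whose insertion order yields the name list) by a single forward pass keeping a move-to-front list of names, then appending the missing defaults and swapping the first two.
import Mathlib
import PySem

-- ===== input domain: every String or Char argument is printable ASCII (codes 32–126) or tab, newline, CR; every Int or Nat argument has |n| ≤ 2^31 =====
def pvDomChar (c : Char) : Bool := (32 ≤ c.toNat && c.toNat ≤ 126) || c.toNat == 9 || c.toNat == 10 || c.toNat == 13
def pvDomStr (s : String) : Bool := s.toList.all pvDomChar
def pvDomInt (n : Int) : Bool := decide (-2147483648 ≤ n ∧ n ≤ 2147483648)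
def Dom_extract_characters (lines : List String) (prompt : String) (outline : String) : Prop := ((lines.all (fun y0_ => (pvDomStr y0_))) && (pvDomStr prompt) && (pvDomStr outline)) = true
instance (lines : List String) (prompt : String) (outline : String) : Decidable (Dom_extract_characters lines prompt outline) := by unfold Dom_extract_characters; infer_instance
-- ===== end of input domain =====

-- B replaces A's reversed pass with a counting dict by a single forward move-to-front list pass; return value only (neither mutates its arguments).

-- ===== PORT A =====
def extract_characters (lines : List String) (prompt : String) (outline : String) : List String × Bool :=
  let characters : PySem.Dict String Int :=
    lines.reverse.foldl (fun d line =>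
      let line := PySem.Str.strip line
      let colon_position := PySem.Str.find line ":"
      if colon_position ≠ -1 then
        let character := PySem.Str.slice line none (some (colon_position + 1))
        d.modify character 0 (· + 1)
      else d) PySem.Dict.empty
  let already_has_character_lines : Bool := characters.size != 0
  let characters := characters.modify "Man:" 0 (· + 1)
  let characters := characters.modify "Woman:" 0 (· + 1)
  let characters_list := characters.keys
  -- the swap characters_list[0], characters_list[1] = characters_list[1], characters_list[0];
  -- the list always has ≥ 2 elements ("Man:"/"Woman:" were just added), so the fallback branch is unreachable
  match characters_list with
  | a :: b :: t => (b :: a :: t, already_has_character_lines)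
  | l => (l, already_has_character_lines)

-- ===== PORT B =====
def extract_characters_alt (lines : List String) (prompt : String) (outline : String) : List String × Bool :=
  let names : List String :=
    lines.foldl (fun ns line =>
      let stripped := PySem.Str.strip line
      let colon := PySem.Str.find stripped ":"
      if colon ≠ -1 then
        let name := PySem.Str.slice stripped none (some (colon + 1))
        name :: (if name ∈ ns then ns.erase name else ns)
      else ns) []
  let already_has_character_lines : Bool := !names.isEmpty
  let names := ["Man:", "Woman:"].foldl (fun ns d => if d ∈ ns then ns else ns ++ [d]) names
  -- names[0], names[1] = names[1], names[0]; ≥ 2 names are guaranteed, the two short branches are unreachable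
  match names with
  | [] => ([], already_has_character_lines)
  | [a] => ([a], already_has_character_lines)
  | a :: b :: t => (b :: a :: t, already_has_character_lines)

-- ===== PRECONDITION & SPEC =====
def Spec_extract_characters (lines : List String) (prompt : String) (outline : String) (out : List String × Bool) : Prop := out = extract_characters_alt lines prompt outline
instance (lines : List String) (prompt : String) (outline : String) (out : List String × Bool) : Decidable (Spec_extract_characters lines prompt outline out) := by unfold Spec_extract_characters; infer_instance

-- ===== CLAIM (what is proved, stated in full; the proofs are below) =====
def Claim_equal_extract_characters : Prop := ∀ (lines : List String) (prompt : String) (outline : String), Dom_extract_characters lines prompt outline → Spec_extract_characters lines prompt outline (extract_characters lines prompt outline)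

-- ===== LEMMAS AND PROOFS =====

/-- The optional character name a line contributes (shared shape of both loop bodies). -/
def pvName (line : String) : Option String :=
  let s := PySem.Str.strip line
  let c := PySem.Str.find s ":"
  if c ≠ -1 then some (PySem.Str.slice s none (some (c + 1))) else none

/-- A conditional loop body is a fold over the filterMap of the contributed elements. -/
theorem foldl_filterMap_body {β : Type} (f : String → Option String) (step : β → String → β)
    (body : β → String → β)
    (hb : ∀ d x, body d x = (match f x with | some n => step d n | none => d)) :
    ∀ (l : List String) (d : β), l.foldl body d = (l.filterMap f).foldl step d := by
  intro l
  induction l with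
  | nil => intro d; rfl
  | cons x xs ih =>
    intro d
    rw [List.foldl_cons, hb, List.filterMap_cons]
    cases f x <;> simp [ih]

theorem foldA_eq (l : List String) (d : PySem.Dict String Int) :
    l.foldl (fun d line =>
      let line := PySem.Str.strip line
      let colon_position := PySem.Str.find line ":"
      if colon_position ≠ -1 then
        let character := PySem.Str.slice line none (some (colon_position + 1))
        d.modify character 0 (· + 1)
      else d) d
    = (l.filterMap pvName).foldl (fun d n => d.modify n 0 (· + 1)) d := by
  refine foldl_filterMap_body pvName _ _ (fun d x => ?_) l d
  simp only [pvName]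
  by_cases h : PySem.Str.find (PySem.Str.strip x) ":" ≠ -1
  · rw [if_pos h, if_pos h]
  · rw [if_neg h, if_neg h]

theorem foldB_eq (l : List String) (ns : List String) :
    l.foldl (fun ns line =>
      let stripped := PySem.Str.strip line
      let colon := PySem.Str.find stripped ":"
      if colon ≠ -1 then
        let name := PySem.Str.slice stripped none (some (colon + 1))
        name :: (if name ∈ ns then ns.erase name else ns)
      else ns) ns
    = (l.filterMap pvName).foldl (fun ns n => n :: (if n ∈ ns then ns.erase n else ns)) ns := by
  refine foldl_filterMap_body pvName _ _ (fun ns x => ?_) l ns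
  simp only [pvName]
  by_cases h : PySem.Str.find (PySem.Str.strip x) ":" ≠ -1
  · rw [if_pos h, if_pos h]
  · rw [if_neg h, if_neg h]

theorem mtf_step (s : PySem.Set String) (h : s.Nodup) (n : String) :
    (n :: (if n ∈ s then s.erase n else s)) = n :: PySem.Set.discard s n := by
  have hd : PySem.Set.discard s n = s.filter (fun y => !y == n) := rfl
  split_ifs with hm
  · rw [List.Nodup.erase_eq_filter h, hd]
    simp [bne]
  · rw [hd, List.filter_eq_self.mpr]
    intro a ha
    have hne : a ≠ n := fun e => hm (e ▸ ha)
    simp [hne]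

/-- Move-to-front over `ns` yields exactly the first-occurrence dedup of `ns.reverse`. -/
theorem mtf_eq_ofList_reverse (ns : List String) :
    ns.foldl (fun ns n => n :: (if n ∈ ns then ns.erase n else ns)) []
    = PySem.Set.ofList ns.reverse := by
  induction ns using List.reverseRecOn with
  | nil => rfl
  | append_singleton xs x ih =>
    rw [List.foldl_append, List.foldl_cons, List.foldl_nil, ih,
      List.reverse_append, List.reverse_singleton, List.singleton_append,
      PySem.Set.ofList_cons]
    exact mtf_step _ (PySem.Set.nodup_ofList _) x

/-- `d[k] = f(…)` appends the key iff it is new. -/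
theorem keys_modify_mem (d : PySem.Dict String Int) (k : String) (d0 : Int) (f : Int → Int) :
    (d.modify k d0 f).keys = if k ∈ d.keys then d.keys else d.keys ++ [k] := by
  rw [PySem.Dict.keys_modify]
  by_cases h : k ∈ d.keys
  · rw [PySem.Dict.keys_insert_of_contains _ _ ((PySem.Dict.contains_iff_mem_keys _ _).mpr h),
      if_pos h]
  · have hc : d.contains k = false := by
      rw [← Bool.not_eq_true, PySem.Dict.contains_iff_mem_keys]; exact h
    rw [PySem.Dict.keys_insert_of_not_contains _ _ hc, if_neg h]

theorem length_ne_zero_eq_not_isEmpty (L : List String) :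
    ((L.length != 0) : Bool) = !L.isEmpty := by
  cases L <;> simp

theorem swap_match_eq (L : List String) (fl : Bool) :
    (match L with
     | a :: b :: t => (b :: a :: t, fl)
     | l => (l, fl))
    = (match L with
       | ([] : List String) => (([] : List String), fl)
       | [a] => ([a], fl)
       | a :: b :: t => (b :: a :: t, fl)) := by
  rcases L with _ | ⟨a, _ | ⟨b, t⟩⟩ <;> rfl

-- ===== VERDICT (by name: the statement is the Claim_ definition above) =====
theorem extract_characters_spec : Claim_equal_extract_characters := by
  intro lines prompt outline _
  show extract_characters lines prompt outline = extract_characters_alt lines prompt outline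
  unfold extract_characters extract_characters_alt
  rw [foldA_eq, foldB_eq, List.filterMap_reverse, ← PySem.Dict.counter_eq_foldl,
    mtf_eq_ofList_reverse]
  have hkeys : (PySem.Dict.counter (List.filterMap pvName lines).reverse).keys
      = PySem.Set.ofList (List.filterMap pvName lines).reverse := PySem.Dict.keys_counter _
  have hsize : ((PySem.Dict.counter (List.filterMap pvName lines).reverse).size != 0 : Bool)
      = !(PySem.Set.ofList (List.filterMap pvName lines).reverse).isEmpty := by
    have hlen : (PySem.Dict.counter (List.filterMap pvName lines).reverse).size
        = (PySem.Set.ofList (List.filterMap pvName lines).reverse).length := by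
      rw [← hkeys]; simp [PySem.Dict.size, PySem.Dict.keys]
    rw [hlen, length_ne_zero_eq_not_isEmpty]
  simp only [List.foldl_cons, List.foldl_nil, keys_modify_mem, hkeys, hsize]
  rw [swap_match_eq]
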